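-- pv_equiv track=rewrite | github.com/yukikitayama/leetcode-python | company/google/google_1859_sorting_the_sentence.py | sortSentence
-- ===== SOURCE A (Python) =====
-- def sortSentence(s: str) -> str:
--     word_nums = s.split(' ')
--     ans = [None] * len(word_nums)
--
--     for wordnum in word_nums:
--         word = wordnum[:-1]
--         num = int(wordnum[-1])
--
--         ans[num - 1] = word
--
--     return ' '.join(ans)
-- ===== SOURCE B (Python) =====
-- def sortSentence(s: str) -> str:
--     words = s.split(' ')
--     ordered = sorted(words, key=lambda w: int(w[-1]))
--     return ' '.join(w[:-1] for w in ordered)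
-- ===== Notes on version B (the rewrite author's own statement) =====
-- stated objective: idiomatic
-- what changed: Instead of allocating a slot array and scattering each word to index num-1, B sorts the word list by the trailing-digit key and strips the digit while joining.
-- outside the precondition, e.g. on sortSentence('x1 y0'): A returns 'x y', B returns 'y x'
import Mathlib
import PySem

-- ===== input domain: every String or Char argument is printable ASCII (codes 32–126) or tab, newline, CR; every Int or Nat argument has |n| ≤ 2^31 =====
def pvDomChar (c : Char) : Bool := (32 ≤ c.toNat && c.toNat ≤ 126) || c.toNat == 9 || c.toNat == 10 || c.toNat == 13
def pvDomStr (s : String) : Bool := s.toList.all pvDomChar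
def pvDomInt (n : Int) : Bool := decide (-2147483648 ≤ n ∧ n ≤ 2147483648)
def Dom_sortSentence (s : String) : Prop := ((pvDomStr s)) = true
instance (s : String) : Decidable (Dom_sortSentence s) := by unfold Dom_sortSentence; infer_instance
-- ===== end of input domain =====

-- B replaces A's scatter into a preallocated slot array by a key sort on the trailing digit (idiomatic, not faster).

-- ===== PORT A =====
-- scatter loop: ans[num-1] = word; a still-None slot is joined as "" here (Python raises TypeError there — outside Pre_)
def sortSentence (s : String) : String :=
  let word_nums := (PySem.Str.split? s " ").getD []
  let ans0 : List (Option String) := List.replicate word_nums.length none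
  let ans := word_nums.foldl (fun ans wordnum =>
    let word := PySem.Str.slice wordnum none (some (-1))
    let num := (PySem.Int.ofChars? [(PySem.Str.pyGet? wordnum (-1)).getD ' ']).getD 0
    PySem.List.pySetD ans (num - 1) (some word)) ans0
  PySem.Str.join " " (ans.map (fun o => o.getD ""))

-- ===== PORT B =====
def sortSentence_alt (s : String) : String :=
  let words := (PySem.Str.split? s " ").getD []
  let ordered := PySem.List.sorted words
    (fun w => (PySem.Int.ofChars? [(PySem.Str.pyGet? w (-1)).getD ' ']).getD 0) false
  PySem.Str.join " " (ordered.map (fun w => PySem.Str.slice w none (some (-1))))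

-- ===== PRECONDITION & SPEC =====
-- int(w[-1]) of a word, exactly as Python evaluates it: none = IndexError (empty word) or ValueError (not a digit)
def pvLastDigit (w : String) : Option Int :=
  (w.toList.getLast?).bind (fun c => PySem.Int.ofChars? [c])

-- the list [1, 2, …, n] of expected trailing digits
def pvR (n : Nat) : List Int := (List.range n).map (fun i : Nat => (i : Int) + 1)

-- Pre_ restricts to the task's natural domain (the LeetCode guarantee): the trailing digits of the
-- space-separated words are exactly 1..n, one each.  Outside it A raises (IndexError/ValueError on a
-- malformed word, IndexError/TypeError on out-of-range or missing digits), except on inputs with a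
-- trailing digit 0, where A's ans[-1] wraps around — an accident of negative indexing B need not match.
def Pre_sortSentence (s : String) : Prop :=
  let ws := (PySem.Str.split? s " ").getD []
  (ws.map pvLastDigit).Perm ((pvR ws.length).map some)
instance (s : String) : Decidable (Pre_sortSentence s) := by unfold Pre_sortSentence; infer_instance

def pvWitness_sortSentence : String := "is2 This1"

def Spec_sortSentence (s : String) (out : String) : Prop := out = sortSentence_alt s
instance (s : String) (out : String) : Decidable (Spec_sortSentence s out) := by unfold Spec_sortSentence; infer_instance

-- ===== CLAIM (what is proved, stated in full; the proofs are below) =====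
def Claim_equal_sortSentence : Prop := ∀ (s : String), Dom_sortSentence s → Pre_sortSentence s → Spec_sortSentence s (sortSentence s)

-- ===== LEMMAS AND PROOFS =====

-- the trailing-digit key as both ports compute it, and the digit-stripping slice
def pvKey (w : String) : Int := (PySem.Int.ofChars? [(PySem.Str.pyGet? w (-1)).getD ' ']).getD 0
def pvStrip (w : String) : String := PySem.Str.slice w none (some (-1))
-- one iteration of A's scatter loop
def pvStep (ans : List (Option String)) (w : String) : List (Option String) :=
  PySem.List.pySetD ans (pvKey w - 1) (some (pvStrip w))

theorem pvKey_eq {w : String} {v : Int} (h : pvLastDigit w = some v) : pvKey w = v := by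
  unfold pvLastDigit at h
  obtain ⟨c, hc, hv⟩ := Option.bind_eq_some_iff.mp h
  unfold pvKey
  simp [PySem.List.pyGet?_neg_one, hc, hv]

theorem pvFoldl_length (ws : List String) (a0 : List (Option String)) :
    (List.foldl pvStep a0 ws).length = a0.length := by
  induction ws generalizing a0 with
  | nil => rfl
  | cons w ws ih => simp [List.foldl_cons, ih, pvStep, PySem.List.length_pySetD]

-- what A's scatter loop leaves in slot i: the first word whose trailing digit is i+1
theorem pvScatter (ws : List String) (n i : Nat) (a0 : List (Option String))
    (hlen : a0.length = n)
    (hb : ∀ w ∈ ws, 1 ≤ pvKey w ∧ pvKey w ≤ (n : Int)) (hnd : (ws.map pvKey).Nodup) :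
    (List.foldl pvStep a0 ws)[i]? =
      match ws.find? (fun w => pvKey w == (i : Int) + 1) with
      | some w => some (some (pvStrip w))
      | none => a0[i]? := by
  induction ws generalizing a0 with
  | nil => simp
  | cons w ws ih =>
    have hb' : ∀ w' ∈ ws, 1 ≤ pvKey w' ∧ pvKey w' ≤ (n : Int) :=
      fun w' hw' => hb w' (List.mem_cons_of_mem _ hw')
    have hnd' : (ws.map pvKey).Nodup := by simpa using hnd.of_cons
    have hkw := hb w (List.mem_cons_self)
    have hset : pvStep a0 w = a0.set (pvKey w - 1).toNat (some (pvStrip w)) :=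
      PySem.List.pySetD_of_nonneg a0 (some (pvStrip w)) (by omega)
    have hlen' : (pvStep a0 w).length = n := by
      rw [hset]; simp [hlen]
    by_cases hk : pvKey w = (i : Int) + 1
    · have hfind : ws.find? (fun w' => pvKey w' == (i : Int) + 1) = none := by
        rw [List.find?_eq_none]
        intro w' hw'
        simp only [beq_iff_eq]
        intro hcon
        have hmem : pvKey w ∈ ws.map pvKey := by
          rw [hk, ← hcon]; exact List.mem_map_of_mem hw'
        exact (List.nodup_cons.mp hnd).1 hmem
      rw [List.foldl_cons, ih (pvStep a0 w) hlen' hb' hnd', hfind]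
      have hfw : (w :: ws).find? (fun w' => pvKey w' == (i : Int) + 1) = some w := by
        simp [List.find?_cons_of_pos, hk]
      rw [hfw, hset]
      have hidx : (pvKey w - 1).toNat = i := by omega
      rw [hidx]
      exact List.getElem?_set_self (by omega)

    · have hfw : (w :: ws).find? (fun w' => pvKey w' == (i : Int) + 1)
           = ws.find? (fun w' => pvKey w' == (i : Int) + 1) := by
        simp [List.find?_cons_of_neg, hk]
      rw [List.foldl_cons, ih (pvStep a0 w) hlen' hb' hnd', hfw, hset]
      have hidx : (pvKey w - 1).toNat ≠ i := by omega
      cases hf : ws.find? (fun w' => pvKey w' == (i : Int) + 1) with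
      | some w' => rfl
      | none => exact List.getElem?_set_ne hidx

theorem pvR_pairwise (n : Nat) : (pvR n).Pairwise (· < ·) := by
  unfold pvR
  rw [List.pairwise_map]
  exact List.pairwise_lt_range.imp (fun h => by omega)

theorem pvR_nodup (n : Nat) : (pvR n).Nodup :=
  (pvR_pairwise n).imp (fun h => ne_of_lt h)

theorem pvR_mem {n : Nat} {v : Int} (h : v ∈ pvR n) : ∃ k : Nat, k < n ∧ v = (k : Int) + 1 := by
  unfold pvR at h
  obtain ⟨k, hk, hkeq⟩ := List.mem_map.mp h
  exact ⟨k, List.mem_range.mp hk, hkeq.symm⟩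

theorem pvR_mem_of_lt {n i : Nat} (hi : i < n) : ((i : Int) + 1) ∈ pvR n :=
  List.mem_map.mpr ⟨i, List.mem_range.mpr hi, rfl⟩

theorem pvR_getElem {n i : Nat} (hi : i < n) : (pvR n)[i]'(by simp [pvR, hi]) = (i : Int) + 1 := by
  simp [pvR]

-- ===== VERDICT (by name: the statement is the Claim_ definition above) =====
theorem sortSentence_spec : Claim_equal_sortSentence := by
  intro s _ hpre
  simp only [Pre_sortSentence] at hpre
  show sortSentence s = sortSentence_alt s
  set ws : List String := (PySem.Str.split? s " ").getD [] with hws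
  set n : Nat := ws.length with hn
  have hpre' : (ws.map pvLastDigit).Perm ((pvR n).map some) := hpre
  -- every word's digit is defined, and its key is it
  have hsome : ∀ w ∈ ws, ∃ v : Int, pvLastDigit w = some v ∧ pvKey w = v := by
    intro w hw
    have hmem : pvLastDigit w ∈ (pvR n).map some :=
      hpre'.mem_iff.mp (List.mem_map_of_mem hw)
    obtain ⟨v, _, hveq⟩ := List.mem_map.mp hmem
    exact ⟨v, hveq.symm, pvKey_eq hveq.symm⟩
  have hmapkey : ws.map pvKey = (ws.map pvLastDigit).map (fun o => o.getD 0) := by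
    rw [List.map_map]
    refine (List.map_congr_left ?_)
    intro w hw
    obtain ⟨v, hv, hkv⟩ := hsome w hw
    simp [Function.comp, hv, hkv]
  have hKperm : (ws.map pvKey).Perm (pvR n) := by
    rw [hmapkey]
    have h1 := hpre'.map (fun o : Option Int => o.getD 0)
    simpa [List.map_map, Function.comp] using h1
  have hKnodup : (ws.map pvKey).Nodup := hKperm.nodup_iff.mpr (pvR_nodup n)
  have hmemkey : ∀ w ∈ ws, ∃ k : Nat, k < n ∧ pvKey w = (k : Int) + 1 := by
    intro w hw
    have : pvKey w ∈ pvR n := hKperm.mem_iff.mp (List.mem_map_of_mem hw)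
    exact (pvR_mem this).imp (fun k hk => ⟨hk.1, hk.2⟩)
  have hbound : ∀ w ∈ ws, 1 ≤ pvKey w ∧ pvKey w ≤ (n : Int) := by
    intro w hw
    obtain ⟨k, hk, hkeq⟩ := hmemkey w hw
    rw [hkeq]
    constructor <;> omega
  -- B's sorted list: its keys are exactly 1..n in order
  set ys : List String := PySem.List.sorted ws pvKey false with hys
  have hys_perm : ys.Perm ws := PySem.List.sorted_perm ws pvKey false
  have hys_len : ys.length = n := by rw [PySem.List.length_sorted]
  have hys_keys_perm : (ys.map pvKey).Perm (pvR n) := (hys_perm.map pvKey).trans hKperm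
  have hys_keys_lt : (ys.map pvKey).Pairwise (· < ·) := by
    have hle : (ys.map pvKey).Pairwise (· ≤ ·) := PySem.List.sorted_map_key_pairwise ws pvKey
    have hne : (ys.map pvKey).Nodup := hys_keys_perm.nodup_iff.mpr (pvR_nodup n)
    exact (hle.and hne).imp (fun h => lt_of_le_of_ne h.1 h.2)
  have hys_keys_eq : ys.map pvKey = pvR n :=
    List.Perm.eq_of_pairwise (fun a b _ _ h1 h2 => absurd h1 (not_lt.mpr h2.le))
      hys_keys_lt (pvR_pairwise n) hys_keys_perm
  have hkey_at : ∀ (i : Nat) (h : i < n), pvKey (ys[i]'(by omega)) = (i : Int) + 1 := by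
    intro i h
    have h1 : (ys.map pvKey)[i]'(by simp [hys_len, h]) = (pvR n)[i]'(by simp [pvR, h]) := by
      simp only [hys_keys_eq]
    rw [pvR_getElem h] at h1
    simpa using h1
  -- the list A's loop produces is exactly B's sorted list, stripped
  have hlists : List.foldl pvStep (List.replicate n (none : Option String)) ws
      = ys.map (fun w => some (pvStrip w)) := by
    apply List.ext_getElem
    · simp [pvFoldl_length, hys_len]
    · intro i h1 h2
      have hi : i < n := by
        have hl := pvFoldl_length ws (List.replicate n (none : Option String))
        simp [hl] at h1
        exact h1
      have hsc := pvScatter ws n i (List.replicate n none) (by simp) hbound hKnodup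
      obtain ⟨w, hfw⟩ : ∃ w, ws.find? (fun w => pvKey w == (i : Int) + 1) = some w := by
        have hmem : ((i : Int) + 1) ∈ ws.map pvKey := hKperm.mem_iff.mpr (pvR_mem_of_lt hi)
        obtain ⟨w, hw, hkeq⟩ := List.mem_map.mp hmem
        have hs : (ws.find? (fun w => pvKey w == (i : Int) + 1)).isSome :=
          List.find?_isSome.mpr ⟨w, hw, by simp [hkeq]⟩
        exact Option.isSome_iff_exists.mp hs
      have hwmem : w ∈ ws := List.mem_of_find?_eq_some hfw
      have hwkey : pvKey w = (i : Int) + 1 := by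
        have hp := List.find?_some hfw
        simpa using hp
      have hysi_mem : ys[i]'(by omega) ∈ ws := hys_perm.mem_iff.mp (List.getElem_mem _)
      have hweq : w = ys[i]'(by omega) :=
        List.inj_on_of_nodup_map hKnodup hwmem hysi_mem (by rw [hwkey, hkey_at i hi])
      have lhs : (List.foldl pvStep (List.replicate n (none : Option String)) ws)[i]?
          = some (some (pvStrip (ys[i]'(by omega)))) := by
        rw [hsc, hfw]
        exact congrArg (fun x => some (some (pvStrip x))) hweq
      rw [List.getElem?_eq_getElem h1] at lhs
      have rhs : (ys.map (fun w => some (pvStrip w)))[i]'h2 = some (pvStrip (ys[i]'(by omega))) := by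
        simp
      rw [rhs]
      exact Option.some.inj lhs
  -- assemble both sides
  show PySem.Str.join " "
      ((List.foldl pvStep (List.replicate n (none : Option String)) ws).map (fun o => o.getD ""))
    = PySem.Str.join " " (ys.map pvStrip)
  rw [hlists, List.map_map]
  rfl
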